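-- pv_equiv track=rewrite | github.com/hrapson-spec/Autosafe_Backend | consolidate_models.py | normalize_make
-- ===== SOURCE A (Python) =====
-- CANONICAL_MAKES = {
--     # Common typos and variations
--     "0PEL": "OPEL",
--     "VOLKSWAGON": "VOLKSWAGEN",
--     "MERCEDES": "MERCEDES-BENZ",
--     "HARLEY": "HARLEY-DAVIDSON",
--     "LAND": "LAND ROVER",
--     "ALFA": "ALFA ROMEO",
--     "ROLLS": "ROLLS-ROYCE",
--     "MOTO": "MOTO GUZZI",
--
--     # Excluded garbage makes (return None to filter out)
--     ".": None,
--     "": None,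
--     "A": None,
--     "THE": None,
--     "AND": None,
--     "FOR": None,
--     "0": None,
--     "1": None,
--     "2": None,
--     "3": None,
-- }
--
-- MAJOR_MAKES = [
--     "AUDI", "BMW", "CHEVROLET", "CITROEN", "DACIA", "DODGE", "FERRARI",
--     "FIAT", "FORD", "HONDA", "HYUNDAI", "ISUZU", "IVECO", "JAGUAR", "JEEP",
--     "KIA", "LAMBORGHINI", "LAND ROVER", "LEXUS", "MASERATI", "MAZDA",
--     "MERCEDES-BENZ", "MG", "MINI", "MITSUBISHI", "NISSAN", "OPEL", "PEUGEOT",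
--     "PORSCHE", "RENAULT", "ROLLS-ROYCE", "SAAB", "SEAT", "SKODA", "SMART",
--     "SSANGYONG", "SUBARU", "SUZUKI", "TESLA", "TOYOTA", "VAUXHALL", "VOLKSWAGEN",
--     "VOLVO", "ALFA ROMEO", "ASTON MARTIN", "BENTLEY", "CHRYSLER", "INFINITI",
--     # Motorcycles
--     "HARLEY-DAVIDSON", "YAMAHA", "KAWASAKI", "DUCATI", "TRIUMPH", "KTM",
--     "APRILIA", "HUSQVARNA", "PIAGGIO", "VESPA"
-- ]
--
-- def normalize_make(raw_make: str) -> str: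
--     """Convert raw make to canonical form. Returns None for non-major makes."""
--     if not raw_make:
--         return None
--
--     make = raw_make.upper().strip()
--
--     # Check explicit mappings first
--     if make in CANONICAL_MAKES:
--         return CANONICAL_MAKES[make]  # May return None for garbage
--
--     # Check if it's a known major make
--     if make in MAJOR_MAKES:
--         return make
--
--     # Try partial matches for compound makes (e.g., "LAND" -> "LAND ROVER")
--     for major in MAJOR_MAKES:
--         if make.startswith(major.split()[0]) and major.split()[0] == make:
--             return major
--
--     # Return None for unknown makes - we only want curated makes
--     return None
-- ===== SOURCE B (Python) =====
-- # B: one flat, fully precomputed canonical table (first-word->major, majors, and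
-- # explicit CANONICAL overrides already merged) so each call is a single dict.get,
-- # with no per-call scan and no staged membership tests.
-- _TABLE = {
--     "AUDI": "AUDI",
--     "BMW": "BMW",
--     "CHEVROLET": "CHEVROLET",
--     "CITROEN": "CITROEN",
--     "DACIA": "DACIA",
--     "DODGE": "DODGE",
--     "FERRARI": "FERRARI",
--     "FIAT": "FIAT",
--     "FORD": "FORD",
--     "HONDA": "HONDA",
--     "HYUNDAI": "HYUNDAI",
--     "ISUZU": "ISUZU",
--     "IVECO": "IVECO",
--     "JAGUAR": "JAGUAR",
--     "JEEP": "JEEP",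
--     "KIA": "KIA",
--     "LAMBORGHINI": "LAMBORGHINI",
--     "LAND": "LAND ROVER",
--     "LEXUS": "LEXUS",
--     "MASERATI": "MASERATI",
--     "MAZDA": "MAZDA",
--     "MERCEDES-BENZ": "MERCEDES-BENZ",
--     "MG": "MG",
--     "MINI": "MINI",
--     "MITSUBISHI": "MITSUBISHI",
--     "NISSAN": "NISSAN",
--     "OPEL": "OPEL",
--     "PEUGEOT": "PEUGEOT",
--     "PORSCHE": "PORSCHE",
--     "RENAULT": "RENAULT",
--     "ROLLS-ROYCE": "ROLLS-ROYCE",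
--     "SAAB": "SAAB",
--     "SEAT": "SEAT",
--     "SKODA": "SKODA",
--     "SMART": "SMART",
--     "SSANGYONG": "SSANGYONG",
--     "SUBARU": "SUBARU",
--     "SUZUKI": "SUZUKI",
--     "TESLA": "TESLA",
--     "TOYOTA": "TOYOTA",
--     "VAUXHALL": "VAUXHALL",
--     "VOLKSWAGEN": "VOLKSWAGEN",
--     "VOLVO": "VOLVO",
--     "ALFA": "ALFA ROMEO",
--     "ASTON": "ASTON MARTIN",
--     "BENTLEY": "BENTLEY",
--     "CHRYSLER": "CHRYSLER",
--     "INFINITI": "INFINITI",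
--     "HARLEY-DAVIDSON": "HARLEY-DAVIDSON",
--     "YAMAHA": "YAMAHA",
--     "KAWASAKI": "KAWASAKI",
--     "DUCATI": "DUCATI",
--     "TRIUMPH": "TRIUMPH",
--     "KTM": "KTM",
--     "APRILIA": "APRILIA",
--     "HUSQVARNA": "HUSQVARNA",
--     "PIAGGIO": "PIAGGIO",
--     "VESPA": "VESPA",
--     "LAND ROVER": "LAND ROVER",
--     "ALFA ROMEO": "ALFA ROMEO",
--     "ASTON MARTIN": "ASTON MARTIN",
--     "0PEL": "OPEL",
--     "VOLKSWAGON": "VOLKSWAGEN",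
--     "MERCEDES": "MERCEDES-BENZ",
--     "HARLEY": "HARLEY-DAVIDSON",
--     "ROLLS": "ROLLS-ROYCE",
--     "MOTO": "MOTO GUZZI",
--     ".": None,
--     "": None,
--     "A": None,
--     "THE": None,
--     "AND": None,
--     "FOR": None,
--     "0": None,
--     "1": None,
--     "2": None,
--     "3": None
-- }
--
-- def normalize_make(raw_make: str) -> str:
--     if not raw_make:
--         return None
--     return _TABLE.get(raw_make.upper().strip())
-- ===== Notes on version B (the rewrite author's own statement) =====
-- stated objective: simpler
-- what changed: B replaces A's staged membership tests (canonical dict, major-makes list membership, then a per-call scan over MAJOR_MAKES comparing first words) with one flat fully precomputed literal table merging all three stages, so each call is a single dict.get.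
import Mathlib
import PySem

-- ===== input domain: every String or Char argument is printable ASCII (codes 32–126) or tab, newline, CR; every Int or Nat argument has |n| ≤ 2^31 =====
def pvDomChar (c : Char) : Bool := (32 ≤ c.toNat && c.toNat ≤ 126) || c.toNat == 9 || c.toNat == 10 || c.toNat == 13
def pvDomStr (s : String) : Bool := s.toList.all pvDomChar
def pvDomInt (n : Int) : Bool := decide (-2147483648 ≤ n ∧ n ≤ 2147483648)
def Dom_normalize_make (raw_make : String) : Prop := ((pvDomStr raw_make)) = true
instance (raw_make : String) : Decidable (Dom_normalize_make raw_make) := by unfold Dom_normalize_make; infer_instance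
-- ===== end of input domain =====

-- B replaces A's staged membership tests and per-call scan over MAJOR_MAKES with one
-- flat precomputed lookup table, making each call a single lookup (objective: simpler).

-- ===== PORT A =====
def pvCANONICAL : PySem.Dict String (Option String) := PySem.Dict.ofList [
  ("0PEL", some "OPEL"), ("VOLKSWAGON", some "VOLKSWAGEN"), ("MERCEDES", some "MERCEDES-BENZ"),
  ("HARLEY", some "HARLEY-DAVIDSON"), ("LAND", some "LAND ROVER"), ("ALFA", some "ALFA ROMEO"),
  ("ROLLS", some "ROLLS-ROYCE"), ("MOTO", some "MOTO GUZZI"),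
  (".", none), ("", none), ("A", none), ("THE", none), ("AND", none), ("FOR", none),
  ("0", none), ("1", none), ("2", none), ("3", none)]

def pvMAJOR : List String := [
  "AUDI", "BMW", "CHEVROLET", "CITROEN", "DACIA", "DODGE", "FERRARI",
  "FIAT", "FORD", "HONDA", "HYUNDAI", "ISUZU", "IVECO", "JAGUAR", "JEEP",
  "KIA", "LAMBORGHINI", "LAND ROVER", "LEXUS", "MASERATI", "MAZDA",
  "MERCEDES-BENZ", "MG", "MINI", "MITSUBISHI", "NISSAN", "OPEL", "PEUGEOT",
  "PORSCHE", "RENAULT", "ROLLS-ROYCE", "SAAB", "SEAT", "SKODA", "SMART",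
  "SSANGYONG", "SUBARU", "SUZUKI", "TESLA", "TOYOTA", "VAUXHALL", "VOLKSWAGEN",
  "VOLVO", "ALFA ROMEO", "ASTON MARTIN", "BENTLEY", "CHRYSLER", "INFINITI",
  "HARLEY-DAVIDSON", "YAMAHA", "KAWASAKI", "DUCATI", "TRIUMPH", "KTM",
  "APRILIA", "HUSQVARNA", "PIAGGIO", "VESPA"]

-- `s.split()[0]`: pyGet? is none exactly where Python raises IndexError (split() empty);
-- unreachable for the non-blank literals of pvMAJOR, on which this is exact.
def pvFirstWord? (s : String) : Option String := PySem.List.pyGet? (PySem.Str.split₀ s) 0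

-- A's `for major in MAJOR_MAKES: if make.startswith(major.split()[0]) and major.split()[0] == make: return major`
def pvLoopA : List String → String → Option String
  | [], _ => none
  | major :: rest, make =>
    match pvFirstWord? major with
    | some first =>
        if PySem.Str.startswith make first && first == make then some major
        else pvLoopA rest make
    | none => pvLoopA rest make

def pvCoreA (make : String) : Option String :=
  match PySem.Dict.get? pvCANONICAL make with
  | some v => v       -- `if make in CANONICAL_MAKES: return CANONICAL_MAKES[make]`
  | none =>
      if make ∈ pvMAJOR then some make
      else pvLoopA pvMAJOR make

def normalize_make (raw_make : String) : Option String :=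
  if raw_make = "" then none
  else pvCoreA (PySem.Str.strip (PySem.Str.upper raw_make))

-- ===== PORT B =====
-- Source B's flat literal table _TABLE (dict → association list, distinct keys in insertion order)
def pvTABLE : List (String × Option String) := [
  ("AUDI", some "AUDI"),
  ("BMW", some "BMW"),
  ("CHEVROLET", some "CHEVROLET"),
  ("CITROEN", some "CITROEN"),
  ("DACIA", some "DACIA"),
  ("DODGE", some "DODGE"),
  ("FERRARI", some "FERRARI"),
  ("FIAT", some "FIAT"),
  ("FORD", some "FORD"),
  ("HONDA", some "HONDA"),
  ("HYUNDAI", some "HYUNDAI"),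
  ("ISUZU", some "ISUZU"),
  ("IVECO", some "IVECO"),
  ("JAGUAR", some "JAGUAR"),
  ("JEEP", some "JEEP"),
  ("KIA", some "KIA"),
  ("LAMBORGHINI", some "LAMBORGHINI"),
  ("LAND", some "LAND ROVER"),
  ("LEXUS", some "LEXUS"),
  ("MASERATI", some "MASERATI"),
  ("MAZDA", some "MAZDA"),
  ("MERCEDES-BENZ", some "MERCEDES-BENZ"),
  ("MG", some "MG"),
  ("MINI", some "MINI"),
  ("MITSUBISHI", some "MITSUBISHI"),
  ("NISSAN", some "NISSAN"),
  ("OPEL", some "OPEL"),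
  ("PEUGEOT", some "PEUGEOT"),
  ("PORSCHE", some "PORSCHE"),
  ("RENAULT", some "RENAULT"),
  ("ROLLS-ROYCE", some "ROLLS-ROYCE"),
  ("SAAB", some "SAAB"),
  ("SEAT", some "SEAT"),
  ("SKODA", some "SKODA"),
  ("SMART", some "SMART"),
  ("SSANGYONG", some "SSANGYONG"),
  ("SUBARU", some "SUBARU"),
  ("SUZUKI", some "SUZUKI"),
  ("TESLA", some "TESLA"),
  ("TOYOTA", some "TOYOTA"),
  ("VAUXHALL", some "VAUXHALL"),
  ("VOLKSWAGEN", some "VOLKSWAGEN"),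
  ("VOLVO", some "VOLVO"),
  ("ALFA", some "ALFA ROMEO"),
  ("ASTON", some "ASTON MARTIN"),
  ("BENTLEY", some "BENTLEY"),
  ("CHRYSLER", some "CHRYSLER"),
  ("INFINITI", some "INFINITI"),
  ("HARLEY-DAVIDSON", some "HARLEY-DAVIDSON"),
  ("YAMAHA", some "YAMAHA"),
  ("KAWASAKI", some "KAWASAKI"),
  ("DUCATI", some "DUCATI"),
  ("TRIUMPH", some "TRIUMPH"),
  ("KTM", some "KTM"),
  ("APRILIA", some "APRILIA"),
  ("HUSQVARNA", some "HUSQVARNA"),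
  ("PIAGGIO", some "PIAGGIO"),
  ("VESPA", some "VESPA"),
  ("LAND ROVER", some "LAND ROVER"),
  ("ALFA ROMEO", some "ALFA ROMEO"),
  ("ASTON MARTIN", some "ASTON MARTIN"),
  ("0PEL", some "OPEL"),
  ("VOLKSWAGON", some "VOLKSWAGEN"),
  ("MERCEDES", some "MERCEDES-BENZ"),
  ("HARLEY", some "HARLEY-DAVIDSON"),
  ("ROLLS", some "ROLLS-ROYCE"),
  ("MOTO", some "MOTO GUZZI"),
  (".", none),
  ("", none),
  ("A", none),
  ("THE", none),
  ("AND", none),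
  ("FOR", none),
  ("0", none),
  ("1", none),
  ("2", none),
  ("3", none)]

-- `_TABLE.get(make)`: first (only) matching key's value, None when absent or stored None
def normalize_make_alt (raw_make : String) : Option String :=
  if raw_make = "" then none
  else ((pvTABLE.lookup (PySem.Str.strip (PySem.Str.upper raw_make))).getD none)

-- ===== PRECONDITION & SPEC =====
def Spec_normalize_make (raw_make : String) (out : Option String) : Prop := out = normalize_make_alt raw_make
instance (raw_make : String) (out : Option String) : Decidable (Spec_normalize_make raw_make out) := by unfold Spec_normalize_make; infer_instance

-- ===== CLAIM (what is proved, stated in full; the proofs are below) =====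
def Claim_equal_normalize_make : Prop := ∀ (raw_make : String), Dom_normalize_make raw_make → Spec_normalize_make raw_make (normalize_make raw_make)

-- ===== LEMMAS AND PROOFS =====

-- the table's key list; both programs return none/None off this set
def pvAllKeys : List String := pvTABLE.map Prod.fst

set_option maxRecDepth 40000 in
theorem pvCore_eq_on_keys : ∀ k ∈ pvAllKeys, pvCoreA k = (pvTABLE.lookup k).getD none := by
  decide

set_option maxRecDepth 40000 in
theorem pvCanonKeys_sub : ∀ x ∈ pvCANONICAL.keys, x ∈ pvAllKeys := by decide

set_option maxRecDepth 40000 in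
theorem pvMajor_sub : ∀ x ∈ pvMAJOR, x ∈ pvAllKeys := by decide

set_option maxRecDepth 40000 in
theorem pvFirstWords_sub : ∀ m ∈ pvMAJOR, (pvFirstWord? m).getD "" ∈ pvAllKeys := by decide

theorem pvLoopA_none (l : List String) (make : String)
    (h : ∀ m ∈ l, ∀ w, pvFirstWord? m = some w → w ≠ make) : pvLoopA l make = none := by
  induction l with
  | nil => rfl
  | cons major rest ih =>
    have hrest : pvLoopA rest make = none :=
      ih (fun m hm w hw => h m (List.mem_cons_of_mem _ hm) w hw)
    cases hfw : pvFirstWord? major with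
    | none => simp [pvLoopA, hfw, hrest]
    | some w =>
      have hne : w ≠ make := h major (List.mem_cons_self) w hfw
      simp [pvLoopA, hfw, hne, hrest]

theorem pvLookup_none (l : List (String × Option String)) (k : String)
    (h : k ∉ l.map Prod.fst) : l.lookup k = none := by
  induction l with
  | nil => rfl
  | cons p rest ih =>
    have h1 : p.1 ≠ k := by
      intro hk; exact h (by simp [hk])
    have h2 : k ∉ rest.map Prod.fst := fun hm => h (by simp [hm])
    simp [List.lookup, beq_eq_false_iff_ne.mpr (fun hk => h1 hk.symm), ih h2]

theorem pvCore_eq (make : String) : pvCoreA make = (pvTABLE.lookup make).getD none := by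
  by_cases h : make ∈ pvAllKeys
  · exact pvCore_eq_on_keys make h
  · -- off the key set both sides are none
    have hB : pvTABLE.lookup make = none := pvLookup_none _ _ (by simpa [pvAllKeys] using h)
    have hC : PySem.Dict.get? pvCANONICAL make = none := by
      rw [PySem.Dict.get?_eq_none_iff_not_mem_keys]
      exact fun hmem => h (pvCanonKeys_sub make hmem)
    have hM : make ∉ pvMAJOR := fun hmem => h (pvMajor_sub make hmem)
    have hL : pvLoopA pvMAJOR make = none := by
      apply pvLoopA_none
      intro m hm w hw rfl
      have := pvFirstWords_sub m hm
      rw [hw] at this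
      exact h this
    simp [pvCoreA, hC, hM, hL, hB]

-- ===== VERDICT (by name: the statement is the Claim_ definition above) =====
theorem normalize_make_spec : Claim_equal_normalize_make := by
  intro raw_make _
  unfold Spec_normalize_make normalize_make normalize_make_alt
  split
  · rfl
  · exact pvCore_eq _
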